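-- pv_equiv track=rewrite | github.com/humwawe/oj | hum/atcoder/abc336/e.py | dp
-- ===== SOURCE A (Python) =====
-- from functools import cache
--
-- def dp(s_num, ds):
--   num = list(map(int, str(s_num)))
--   n = len(num)
--
--   @cache
--   def __dfs(i, cur, dig_sum, limit, lead):
--     if dig_sum > ds:
--       return 0
--
--     if i == n:
--       if dig_sum == ds and cur == 0:
--         return 0 if lead else 1
--       return 0
--
--     res = 0
--     if lead:
--       res = __dfs(i + 1, cur, dig_sum, False, True)
--
--     up = num[i] if limit else 9
--     low = 1 if lead else 0
--
--     for j in range(low, up + 1):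
--       res += __dfs(i + 1, (cur * 10 + j) % ds, dig_sum + j, limit and j == up, False)
--     return res
--
--   return __dfs(0, 0, 0, True, True)
-- ===== SOURCE B (Python) =====
-- def dp(s_num, ds):
--   digits = [int(c) for c in str(s_num)]
--   n = len(digits)
--   if s_num == 0 or ds < 0 or 9 * n < ds:
--     # 0 itself never counts (leading-zero rule), and a digit sum of ds is unreachable
--     return 0
--   # T[r][m][s] = completions by r unconstrained digits from remainder m, digit sum s
--   T = [[[1 if m == 0 and s == ds else 0 for s in range(ds + 1)] for m in range(ds)]]
--   for r in range(1, n):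
--     prev = T[-1]
--     T.append([[sum(prev[(m * 10 + j) % ds][s + j] for j in range(10) if s + j <= ds)
--                for s in range(ds + 1)] for m in range(ds)])
--   total = 0
--   cur, dsum = 0, 0  # the tight prefix state: digits[:i] placed exactly
--   for i in range(n):
--     d = digits[i]
--     r = n - 1 - i
--     if dsum <= ds:
--       for j in range(1 if i == 0 else 0, d):
--         if dsum + j <= ds:
--           total += T[r][(cur * 10 + j) % ds][dsum + j]
--     if i > 0:
--       # first nonzero digit placed here after i leading zeros
--       for j in range(1, min(9, ds) + 1):
--         total += T[r][j % ds][j]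
--     cur = (cur * 10 + d) % ds
--     dsum += d
--   if dsum == ds and cur == 0:
--     total += 1
--   return total
-- ===== Notes on version B (the rewrite author's own statement) =====
-- stated objective: alternative
-- what changed: Replaced A's memoized top-down recursion (@cache dfs over position/mod/digit-sum/tight/lead) by an iterative bottom-up digit DP: it precomputes, per remaining length r, a table T[r][mod][digit_sum] of unconstrained completions, then makes one pass over the digit positions accumulating the contributions of the tight prefix and of the leading-zeros chain, with natural early returns when s_num is 0, ds is negative, or ds exceeds the maximum possible digit sum; Pre_ excludes s_num < 0 (int('-') raises ValueError in both) and ds = 0 with s_num > 0 (the '% ds' raises ZeroDivisionError in both).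
import Mathlib
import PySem

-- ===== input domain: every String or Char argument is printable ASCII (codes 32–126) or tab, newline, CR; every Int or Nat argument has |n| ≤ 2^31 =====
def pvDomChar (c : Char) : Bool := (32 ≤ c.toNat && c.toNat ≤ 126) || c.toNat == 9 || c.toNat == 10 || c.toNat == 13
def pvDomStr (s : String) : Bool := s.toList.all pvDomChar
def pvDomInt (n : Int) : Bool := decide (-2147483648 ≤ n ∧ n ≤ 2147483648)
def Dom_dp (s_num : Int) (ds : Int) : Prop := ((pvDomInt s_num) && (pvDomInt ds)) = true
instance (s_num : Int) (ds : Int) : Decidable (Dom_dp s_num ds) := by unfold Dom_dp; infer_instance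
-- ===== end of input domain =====

-- B replaces A's memoized top-down recursion by a bottom-up table digit DP: per-suffix-length
-- tables of free-completion counts plus one explicit pass over the tight/leading spine
-- (objective: alternative).

-- ===== PORT A =====
-- num = list(map(int, str(s_num))); exact for s_num ≥ 0 (Pre_ excludes negatives, where int('-') raises)
def dpDigitsA (s_num : Int) : List Int :=
  (PySem.Int.toChars s_num).map (fun c => (c.toNat : Int) - 48)

-- literal port of A's recursive __dfs (the @cache decorator does not change the value)
def dfsA (ds : Int) (rem : List Int) (cur : Int) (dig_sum : Int) (limit : Bool) (lead : Bool) : Int :=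
  if dig_sum > ds then 0
  else
    match rem with
    | [] => if dig_sum = ds ∧ cur = 0 then (if lead then 0 else 1) else 0
    | d :: rest =>
      let res : Int := if lead then dfsA ds rest cur dig_sum false true else 0
      let up : Int := if limit then d else 9
      let low : Int := if lead then 1 else 0
      (PySem.List.pyRange low (up + 1)).foldl
        (fun acc j =>
          acc + dfsA ds rest (PySem.Int.mod (cur * 10 + j) ds) (dig_sum + j) (limit && (j == up)) false)
        res

def dp (s_num : Int) (ds : Int) : Int :=
  dfsA ds (dpDigitsA s_num) 0 0 true true

-- ===== PORT B =====
def dpDigitsB (s_num : Int) : List Int :=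
  (PySem.Int.toChars s_num).map (fun c => (c.toNat : Int) - 48)

-- the base table: T[0][m][s] = 1 iff m == 0 and s == ds
def dpTab0B (ds : Int) : List (List Int) :=
  (PySem.List.pyRange 0 ds).map (fun m =>
    (PySem.List.pyRange 0 (ds + 1)).map (fun s => if m = 0 ∧ s = ds then (1 : Int) else 0))

-- one more free digit in front: T[r+1] from prev = T[r]
def dpNextB (ds : Int) (prev : List (List Int)) : List (List Int) :=
  (PySem.List.pyRange 0 ds).map (fun m =>
    (PySem.List.pyRange 0 (ds + 1)).map (fun s =>
      (PySem.List.pyRange 0 10).foldl (fun a j =>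
        if s + j ≤ ds then
          a + PySem.List.pyGetD (PySem.List.pyGetD prev (PySem.Int.mod (m * 10 + j) ds) []) (s + j) 0
        else a) 0))

-- the list T[0..n-1] built by appending, reading T[-1] each round
def dpTablesB (ds : Int) (n : Int) : List (List (List Int)) :=
  (PySem.List.pyRange 1 n).foldl
    (fun T _ => T ++ [dpNextB ds (PySem.List.pyGetD T (-1) [])]) [dpTab0B ds]

-- T[r][m][s]
def dpLookupB (T : List (List (List Int))) (r m s : Int) : Int :=
  PySem.List.pyGetD (PySem.List.pyGetD (PySem.List.pyGetD T r []) m []) s 0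

-- loop body, part 1: branches leaving the tight prefix at position i
def dpTightAddB (ds n : Int) (digits : List Int) (T : List (List (List Int)))
    (acc : Int × Int × Int) (i : Int) : Int :=
  if acc.2.2 ≤ ds then
    (PySem.List.pyRange (if i = 0 then 1 else 0) (PySem.List.pyGetD digits i 0)).foldl
      (fun t j =>
        if acc.2.2 + j ≤ ds then
          t + dpLookupB T (n - 1 - i) (PySem.Int.mod (acc.2.1 * 10 + j) ds) (acc.2.2 + j)
        else t) acc.1
  else acc.1

-- loop body, part 2: the first nonzero digit placed at position i > 0 after leading zeros
def dpLeadAddB (ds n : Int) (T : List (List (List Int))) (i : Int) (t0 : Int) : Int :=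
  if i > 0 then
    (PySem.List.pyRange 1 (min 9 ds + 1)).foldl
      (fun t j => t + dpLookupB T (n - 1 - i) (PySem.Int.mod j ds) j) t0
  else t0

def dpSpineStepB (ds n : Int) (digits : List Int) (T : List (List (List Int)))
    (acc : Int × Int × Int) (i : Int) : Int × Int × Int :=
  ( dpLeadAddB ds n T i (dpTightAddB ds n digits T acc i)
  , PySem.Int.mod (acc.2.1 * 10 + PySem.List.pyGetD digits i 0) ds
  , acc.2.2 + PySem.List.pyGetD digits i 0 )

def dp_alt (s_num : Int) (ds : Int) : Int :=
  let digits := dpDigitsB s_num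
  let n : Int := digits.length
  if s_num = 0 ∨ ds < 0 ∨ 9 * n < ds then 0
  else
    let res := (PySem.List.pyRange 0 n).foldl
      (dpSpineStepB ds n digits (dpTablesB ds n)) (0, 0, 0)
    if res.2.2 = ds ∧ res.2.1 = 0 then res.1 + 1 else res.1

-- ===== PRECONDITION & SPEC =====
-- Pre_ excludes s_num < 0 (int('-') raises ValueError in both) and ds = 0 with s_num > 0
-- (A's '% ds' raises ZeroDivisionError, and so does B's tight-prefix update).
def Pre_dp (s_num : Int) (ds : Int) : Prop := 0 ≤ s_num ∧ (ds ≠ 0 ∨ s_num = 0)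
instance (s_num : Int) (ds : Int) : Decidable (Pre_dp s_num ds) := by unfold Pre_dp; infer_instance
def pvWitness_dp : Int × Int := (123, 6)

def Spec_dp (s_num : Int) (ds : Int) (out : Int) : Prop := out = dp_alt s_num ds
instance (s_num : Int) (ds : Int) (out : Int) : Decidable (Spec_dp s_num ds out) := by unfold Spec_dp; infer_instance

-- ===== CLAIM =====
def Claim_equal_dp : Prop := ∀ (s_num : Int) (ds : Int), Dom_dp s_num ds → Pre_dp s_num ds → Spec_dp s_num ds (dp s_num ds)

-- ===== LEMMAS AND PROOFS =====

-- every element is a decimal digit value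
def digitsOK (l : List Int) : Prop := ∀ d ∈ l, 0 ≤ d ∧ d ≤ 9

-- ---- facts about Nat.toDigitsCore (str(n) for n ≥ 0) ----

lemma tdc_append (b f : Nat) : ∀ (n : Nat) (acc : List Char),
    Nat.toDigitsCore b f n acc = Nat.toDigitsCore b f n [] ++ acc := by
  induction f with
  | zero => intro n acc; simp [Nat.toDigitsCore]
  | succ f ih =>
    intro n acc
    simp only [Nat.toDigitsCore]
    by_cases h : n / b = 0
    · simp [h]
    · rw [if_neg h, if_neg h, ih (n / b) ((n % b).digitChar :: acc),
        ih (n / b) [(n % b).digitChar]]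
      simp

lemma digitChar_mem (m : Nat) (h : m < 10) :
    48 ≤ (Nat.digitChar m).toNat ∧ (Nat.digitChar m).toNat ≤ 57 := by
  interval_cases m <;> decide

lemma digitChar_head (m : Nat) (h1 : 1 ≤ m) (h2 : m < 10) :
    49 ≤ (Nat.digitChar m).toNat ∧ (Nat.digitChar m).toNat ≤ 57 := by
  interval_cases m <;> decide

lemma tdc_mem (f : Nat) : ∀ (n : Nat) (c : Char), c ∈ Nat.toDigitsCore 10 f n [] →
    48 ≤ c.toNat ∧ c.toNat ≤ 57 := by
  induction f with
  | zero => intro n c hc; simp [Nat.toDigitsCore] at hc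
  | succ f ih =>
    intro n c hc
    simp only [Nat.toDigitsCore] at hc
    by_cases h : n / 10 = 0
    · rw [if_pos h] at hc
      simp at hc
      subst hc
      exact digitChar_mem _ (Nat.mod_lt _ (by norm_num))
    · rw [if_neg h, tdc_append] at hc
      rcases List.mem_append.mp hc with h' | h'
      · exact ih _ _ h'
      · simp at h'
        subst h'
        exact digitChar_mem _ (Nat.mod_lt _ (by norm_num))

lemma tdc_head (f : Nat) : ∀ (n : Nat), 0 < n → n < 10 ^ f →
    ∃ d tl, Nat.toDigitsCore 10 f n [] = d :: tl ∧ 49 ≤ d.toNat ∧ d.toNat ≤ 57 := by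
  induction f with
  | zero => intro n h0 h1; omega
  | succ f ih =>
    intro n h0 h1
    simp only [Nat.toDigitsCore]
    by_cases h : n / 10 = 0
    · rw [if_pos h]
      have hn : n < 10 := by omega
      have : n % 10 = n := Nat.mod_eq_of_lt hn
      refine ⟨(n % 10).digitChar, [], rfl, ?_⟩
      rw [this]
      exact digitChar_head n h0 hn
    · rw [if_neg h, tdc_append]
      have h0' : 0 < n / 10 := Nat.pos_of_ne_zero h
      have h1' : n / 10 < 10 ^ f := by
        apply Nat.div_lt_of_lt_mul
        calc n < 10 ^ (f + 1) := h1
        _ = 10 * 10 ^ f := by ring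
      obtain ⟨d, tl, heq, hd⟩ := ih (n / 10) h0' h1'
      exact ⟨d, tl ++ [(n % 10).digitChar], by rw [heq]; simp, hd⟩

-- ---- the digit list of s_num ----

lemma digitsA_ok (s_num : Int) (h : 0 ≤ s_num) : digitsOK (dpDigitsA s_num) := by
  intro d hd
  unfold dpDigitsA PySem.Int.toChars at hd
  rw [if_neg (by omega)] at hd
  obtain ⟨c, hc, rfl⟩ := List.mem_map.mp hd
  have := tdc_mem _ _ _ hc
  omega

lemma digitsA_head (s_num : Int) (h : 0 < s_num) :
    ∃ d rest, dpDigitsA s_num = d :: rest ∧ 1 ≤ d ∧ d ≤ 9 := by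
  have h0 : 0 < s_num.toNat := by omega
  have h1 : s_num.toNat < 10 ^ (s_num.toNat + 1) := by
    calc s_num.toNat < 10 ^ s_num.toNat := Nat.lt_pow_self (by norm_num)
    _ ≤ 10 ^ (s_num.toNat + 1) := Nat.pow_le_pow_right (by norm_num) (by omega)
  obtain ⟨c, tl, heq, hc⟩ := tdc_head (s_num.toNat + 1) s_num.toNat h0 h1
  refine ⟨(c.toNat : Int) - 48, tl.map (fun c => (c.toNat : Int) - 48), ?_, by omega, by omega⟩
  unfold dpDigitsA PySem.Int.toChars
  rw [if_neg (by omega)]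
  show (Nat.toDigits 10 s_num.toNat).map _ = _
  unfold Nat.toDigits
  rw [heq]
  simp

lemma digitsA_zero : dpDigitsA 0 = [0] := by decide

-- ---- simple dfsA facts ----

lemma dfsA_gt (ds : Int) (rem : List Int) (cur dsum : Int) (tight lead : Bool)
    (h : dsum > ds) : dfsA ds rem cur dsum tight lead = 0 := by
  rw [dfsA.eq_def, if_pos h]

lemma dfsA_nil (ds cur dsum : Int) (tight lead : Bool) :
    dfsA ds [] cur dsum tight lead
      = if dsum > ds then 0 else if dsum = ds ∧ cur = 0 then (if lead then 0 else 1) else 0 := by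
  rw [dfsA.eq_def]

-- one step of A's recursion, written as a head term plus a mapped sum over the digit range
lemma dfsA_cons (ds d : Int) (rest : List Int) (cur dsum : Int) (tight lead : Bool)
    (h : ¬ dsum > ds) :
    dfsA ds (d :: rest) cur dsum tight lead
      = (if lead then dfsA ds rest cur dsum false true else 0)
        + ((PySem.List.pyRange (if lead then (1 : Int) else 0) ((if tight then d else 9) + 1)).map
            (fun j => dfsA ds rest (PySem.Int.mod (cur * 10 + j) ds) (dsum + j)
              (tight && (j == (if tight then d else 9))) false)).sum := by
  rw [dfsA, if_neg h]
  exact PySem.List.foldl_add _ _ _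

lemma dfsA_big (ds : Int) : ∀ (rem : List Int) (cur dsum : Int) (tight lead : Bool),
    digitsOK rem → dsum + 9 * (rem.length : Int) < ds →
    dfsA ds rem cur dsum tight lead = 0 := by
  intro rem
  induction rem with
  | nil =>
    intro cur dsum tight lead _ hlt
    simp only [List.length_nil, Int.natCast_zero, mul_zero, add_zero] at hlt
    rw [dfsA_nil, if_neg (by omega), if_neg (by rintro ⟨h, -⟩; omega)]
  | cons d rest ih =>
    intro cur dsum tight lead hok hlt
    have hd := hok d List.mem_cons_self
    have hrest : digitsOK rest := fun x hx => hok x (List.mem_cons_of_mem _ hx)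
    have hlt' : dsum + 9 * ((rest.length : Nat) : Int) + 9 < ds := by
      simp only [List.length_cons] at hlt
      push_cast at hlt ⊢
      omega
    have hgt : ¬ dsum > ds := by omega
    rw [dfsA_cons ds d rest cur dsum tight lead hgt]
    have hz : ∀ j ∈ PySem.List.pyRange (if lead then (1 : Int) else 0) ((if tight then d else 9) + 1),
        dfsA ds rest (PySem.Int.mod (cur * 10 + j) ds) (dsum + j)
          (tight && (j == (if tight then d else 9))) false = 0 := by
      intro j hj
      rw [PySem.List.mem_pyRange_one] at hj
      have hup : (if tight then d else 9) ≤ 9 := by split <;> omega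
      exact ih _ _ _ _ hrest (by omega)
    rw [List.map_congr_left (fun j hj => hz j hj)]
    have hres : (if lead then dfsA ds rest cur dsum false true else 0) = 0 := by
      split
      · exact ih _ _ _ _ hrest (by omega)
      · rfl
    rw [hres]
    simp

lemma dfsA_snum_zero (ds : Int) : dfsA ds [0] 0 0 true true = 0 := by
  by_cases h : (0 : Int) > ds
  · exact dfsA_gt _ _ _ _ _ _ h
  · rw [dfsA_cons ds 0 [] 0 0 true true h]
    simp only [if_true]
    rw [PySem.List.pyRange_one_eq_nil (by norm_num : (0 : Int) + 1 ≤ 1)]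
    simp only [List.map_nil, List.sum_nil, add_zero]
    rw [dfsA_nil, if_neg h]
    simp

-- ---- list-indexing helpers ----

lemma pyGetD_map_range {β : Type} (f : Nat → β) (k : Nat) (i : Int) (dflt : β)
    (h0 : 0 ≤ i) (h1 : i < (k : Int)) :
    PySem.List.pyGetD ((List.range k).map f) i dflt = f i.toNat := by
  rw [PySem.List.pyGetD_eq_getElem _ dflt h0 (by simpa using h1)]
  simp [List.getElem_map, List.getElem_range]

lemma pyGetD_neg_one_map_range {β : Type} (f : Nat → β) (m : Nat) (dflt : β) :
    PySem.List.pyGetD ((List.range (m + 1)).map f) (-1) dflt = f m := by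
  simp only [PySem.List.pyGetD, PySem.List.pyGet?, PySem.List.pyIdx?]
  norm_num

lemma pyGetD_map_pyRangeI {β : Type} (f : Int → β) (b i : Int) (dflt : β)
    (h0 : 0 ≤ i) (h1 : i < b) :
    PySem.List.pyGetD ((PySem.List.pyRange 0 b).map f) i dflt = f i := by
  have hb : b = ((b.toNat : Nat) : Int) := by omega
  rw [hb, PySem.List.pyRange_zero_natCast, List.map_map,
    pyGetD_map_range (f ∘ fun k : Nat => ((k : Nat) : Int)) b.toNat i dflt h0 (by omega)]
  show f ((i.toNat : Nat) : Int) = f i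
  congr 1
  omega

-- ---- the tables ----

-- the r-th table as a pure recursion
def tabL (ds : Int) : Nat → List (List Int)
  | 0 => dpTab0B ds
  | r + 1 => dpNextB ds (tabL ds r)

-- the (m, s) entry of the r-th table as a pure function
def tabF (ds : Int) : Nat → Int → Int → Int
  | 0 => fun m s => if m = 0 ∧ s = ds then 1 else 0
  | r + 1 => fun m s =>
      (PySem.List.pyRange 0 10).foldl (fun a j =>
        if s + j ≤ ds then a + tabF ds r (PySem.Int.mod (m * 10 + j) ds) (s + j) else a) 0

lemma tables_eq (ds : Int) (n : Int) (hn : 1 ≤ n) :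
    dpTablesB ds n = (List.range n.toNat).map (tabL ds) := by
  induction n, hn using Int.le_induction with
  | base =>
    unfold dpTablesB
    rw [PySem.List.pyRange_one_eq_nil (by norm_num)]
    simp [tabL]
  | succ n hn ih =>
    unfold dpTablesB at ih ⊢
    rw [PySem.List.pyRange_one_succ_right hn, List.foldl_append, ih]
    simp only [List.foldl_cons, List.foldl_nil]
    have hm : n.toNat = (n.toNat - 1) + 1 := by omega
    have hlast : PySem.List.pyGetD ((List.range n.toNat).map (tabL ds)) (-1) []
        = tabL ds (n.toNat - 1) := by
      rw [hm]
      exact pyGetD_neg_one_map_range (tabL ds) (n.toNat - 1) []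
    rw [hlast]
    have h1 : (n + 1).toNat = n.toNat + 1 := by omega
    rw [h1, List.range_succ, List.map_append, List.map_cons, List.map_nil]
    congr 1
    show [dpNextB ds (tabL ds (n.toNat - 1))] = [tabL ds n.toNat]
    rw [hm]
    rfl

lemma tab_entry (ds : Int) : ∀ (r : Nat) (m s : Int), 0 ≤ m → m < ds → 0 ≤ s → s ≤ ds →
    PySem.List.pyGetD (PySem.List.pyGetD (tabL ds r) m []) s 0 = tabF ds r m s := by
  intro r
  induction r with
  | zero =>
    intro m s hm0 hm1 hs0 hs1
    unfold tabL dpTab0B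
    rw [pyGetD_map_pyRangeI _ ds m [] hm0 hm1,
      pyGetD_map_pyRangeI _ (ds + 1) s 0 hs0 (by omega)]
    rfl
  | succ r ih =>
    intro m s hm0 hm1 hs0 hs1
    show PySem.List.pyGetD (PySem.List.pyGetD (dpNextB ds (tabL ds r)) m []) s 0 = _
    unfold dpNextB
    rw [pyGetD_map_pyRangeI _ ds m [] hm0 hm1,
      pyGetD_map_pyRangeI _ (ds + 1) s 0 hs0 (by omega)]
    have hds : 0 < ds := by omega
    rw [PySem.List.foldl_congr_mem _ _
      (fun a j => if s + j ≤ ds then a + tabF ds r (PySem.Int.mod (m * 10 + j) ds) (s + j) else a) 0 ?_]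
    · rfl
    · intro acc j hj
      rw [PySem.List.mem_pyRange_one] at hj
      by_cases hg : s + j ≤ ds
      · simp only [if_pos hg]
        rw [ih (PySem.Int.mod (m * 10 + j) ds) (s + j)
            (PySem.Int.mod_nonneg _ hds) (PySem.Int.mod_lt _ hds) (by omega) hg]
      · simp only [if_neg hg]

lemma lookup_eq (ds n r m s : Int) (hn : 1 ≤ n) (hr0 : 0 ≤ r) (hr1 : r < n)
    (hm0 : 0 ≤ m) (hm1 : m < ds) (hs0 : 0 ≤ s) (hs1 : s ≤ ds) :
    dpLookupB (dpTablesB ds n) r m s = tabF ds r.toNat m s := by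
  unfold dpLookupB
  rw [tables_eq ds n hn, pyGetD_map_range (tabL ds) n.toNat r [] hr0 (by omega),
    tab_entry ds r.toNat m s hm0 hm1 hs0 hs1]

-- ---- tables compute the non-tight, non-leading dfsA values ----

lemma tab_dfs (ds : Int) : ∀ (rem : List Int) (m s : Int), digitsOK rem →
    0 ≤ m → m < ds → 0 ≤ s → s ≤ ds →
    tabF ds rem.length m s = dfsA ds rem m s false false := by
  intro rem
  induction rem with
  | nil =>
    intro m s _ hm0 hm1 hs0 hs1
    show (if m = 0 ∧ s = ds then (1 : Int) else 0) = _
    rw [dfsA_nil, if_neg (show ¬ s > ds by omega)]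
    by_cases h : s = ds ∧ m = 0
    · rw [if_pos (show m = 0 ∧ s = ds from ⟨h.2, h.1⟩), if_pos h]
      simp
    · rw [if_neg (show ¬ (m = 0 ∧ s = ds) by tauto), if_neg h]
  | cons d rest ih =>
    intro m s hok hm0 hm1 hs0 hs1
    have hrest : digitsOK rest := fun x hx => hok x (List.mem_cons_of_mem _ hx)
    have hds : 0 < ds := by omega
    rw [dfsA_cons ds d rest m s false false (by omega)]
    simp only [Bool.false_eq_true, if_false, Bool.false_and, zero_add, List.length_cons]
    show (PySem.List.pyRange 0 10).foldl (fun a j =>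
      if s + j ≤ ds then a + tabF ds rest.length (PySem.Int.mod (m * 10 + j) ds) (s + j) else a) 0 = _
    rw [PySem.List.foldl_congr_mem _ _
      (fun a j => a + (if s + j ≤ ds then
        dfsA ds rest (PySem.Int.mod (m * 10 + j) ds) (s + j) false false else 0)) 0 ?_]
    · rw [PySem.List.foldl_add]
      rw [zero_add]
      congr 1
      apply List.map_congr_left
      intro j hj
      rw [PySem.List.mem_pyRange_one] at hj
      by_cases hg : s + j ≤ ds
      · rw [if_pos hg]
      · rw [if_neg hg, dfsA_gt _ _ _ _ _ _ (by omega)]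
    · intro acc j hj
      rw [PySem.List.mem_pyRange_one] at hj
      by_cases hg : s + j ≤ ds
      · simp only [if_pos hg]
        rw [ih (PySem.Int.mod (m * 10 + j) ds) (s + j) hrest
            (PySem.Int.mod_nonneg _ hds) (PySem.Int.mod_lt _ hds) (by omega) hg]
      · simp only [if_neg hg]
        simp

-- ---- the two one-step expansions of A along the spine ----

lemma tight_split (ds d : Int) (rest : List Int) (cur dsum : Int) (lead : Bool)
    (hds : 1 ≤ ds) (hd0 : (if lead then (1 : Int) else 0) ≤ d) (hd9 : d ≤ 9)
    (hrest : digitsOK rest) (hdsum : 0 ≤ dsum) (hle : dsum ≤ ds) :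
    dfsA ds (d :: rest) cur dsum true lead
      = (if lead then dfsA ds rest cur dsum false true else 0)
        + ((PySem.List.pyRange (if lead then (1 : Int) else 0) d).map
            (fun j => if dsum + j ≤ ds then
              tabF ds rest.length (PySem.Int.mod (cur * 10 + j) ds) (dsum + j) else 0)).sum
        + dfsA ds rest (PySem.Int.mod (cur * 10 + d) ds) (dsum + d) true false := by
  have hds0 : 0 < ds := by omega
  rw [dfsA_cons ds d rest cur dsum true lead (by omega)]
  simp only [if_true]
  rw [PySem.List.pyRange_one_succ_right (le_trans hd0 (le_refl d)) ]
  rw [List.map_append, List.sum_append]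
  simp only [List.map_cons, List.map_nil, List.sum_cons, List.sum_nil, add_zero]
  have htight : (true && (d == d)) = true := by simp
  rw [htight]
  have hmap : (PySem.List.pyRange (if lead then (1 : Int) else 0) d).map
      (fun j => dfsA ds rest (PySem.Int.mod (cur * 10 + j) ds) (dsum + j) (true && (j == d)) false)
      = (PySem.List.pyRange (if lead then (1 : Int) else 0) d).map
      (fun j => if dsum + j ≤ ds then
        tabF ds rest.length (PySem.Int.mod (cur * 10 + j) ds) (dsum + j) else 0) := by
    apply List.map_congr_left
    intro j hj
    rw [PySem.List.mem_pyRange_one] at hj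
    have hjd : (j == d) = false := by
      simp only [beq_eq_false_iff_ne, ne_eq]
      omega
    rw [hjd]
    simp only [Bool.and_false]
    by_cases hg : dsum + j ≤ ds
    · rw [if_pos hg,
        tab_dfs ds rest (PySem.Int.mod (cur * 10 + j) ds) (dsum + j) hrest
          (PySem.Int.mod_nonneg _ hds0) (PySem.Int.mod_lt _ hds0)
          (by split at hj <;> omega) hg]
    · rw [if_neg hg, dfsA_gt _ _ _ _ _ _ (by omega)]
  rw [hmap]
  ring

lemma lead_split (ds d : Int) (rest : List Int) (hds : 1 ≤ ds) (hrest : digitsOK rest) :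
    dfsA ds (d :: rest) 0 0 false true
      = dfsA ds rest 0 0 false true
        + ((PySem.List.pyRange 1 (min 9 ds + 1)).map
            (fun j => tabF ds rest.length (PySem.Int.mod j ds) j)).sum := by
  have hds0 : 0 < ds := by omega
  rw [dfsA_cons ds d rest 0 0 false true (by omega)]
  simp only [if_true, Bool.false_eq_true, if_false, Bool.false_and]
  congr 1
  rw [PySem.List.pyRange_one_append 1 (min 9 ds + 1) (9 + 1) (by omega) (by omega)]
  rw [List.map_append, List.sum_append]
  have htail : ((PySem.List.pyRange (min 9 ds + 1) (9 + 1)).map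
      (fun j => dfsA ds rest (PySem.Int.mod (0 * 10 + j) ds) (0 + j) false false)).sum = 0 := by
    apply List.sum_eq_zero
    intro x hx
    obtain ⟨j, hj, rfl⟩ := List.mem_map.mp hx
    rw [PySem.List.mem_pyRange_one] at hj
    exact dfsA_gt _ _ _ _ _ _ (by omega)
  rw [htail, add_zero]
  apply congrArg List.sum
  apply List.map_congr_left
  intro j hj
  rw [PySem.List.mem_pyRange_one] at hj
  have h1 : (0 : Int) * 10 + j = j := by ring
  have h2 : (0 : Int) + j = j := by ring
  rw [h1, h2,
    tab_dfs ds rest (PySem.Int.mod j ds) j hrest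
      (PySem.Int.mod_nonneg _ hds0) (PySem.Int.mod_lt _ hds0) (by omega) (by omega)]

-- B's final `if` as a function of the loop state
def epilogB (ds : Int) (res : Int × Int × Int) : Int :=
  if res.2.2 = ds ∧ res.2.1 = 0 then res.1 + 1 else res.1

-- converting B's guarded accumulation loops into mapped sums
lemma foldl_guard_add (l : List Int) (P : Int → Prop) [DecidablePred P] (g : Int → Int) (t0 : Int) :
    l.foldl (fun t j => if P j then t + g j else t) t0
      = t0 + (l.map (fun j => if P j then g j else 0)).sum := by
  rw [PySem.List.foldl_congr_mem _ _ (fun t j => t + (if P j then g j else 0)) t0 ?_]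
  · exact PySem.List.foldl_add _ _ _
  · intro acc j _
    by_cases h : P j
    · simp only [if_pos h]
    · simp only [if_neg h, add_zero]

-- ---- the spine invariant ----

lemma spine_inv (ds : Int) (digits : List Int) (hds : 1 ≤ ds) (hdig : digitsOK digits) :
    ∀ (k : Nat) (i tot cur dsum : Int), i = (digits.length : Int) - (k : Int) → 1 ≤ i → 0 ≤ dsum →
    epilogB ds ((PySem.List.pyRange i (digits.length : Int)).foldl
        (dpSpineStepB ds (digits.length : Int) digits (dpTablesB ds (digits.length : Int)))
        (tot, cur, dsum))
      = tot + dfsA ds (digits.drop i.toNat) cur dsum true false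
          + dfsA ds (digits.drop i.toNat) 0 0 false true := by
  intro k
  induction k with
  | zero =>
    intro i tot cur dsum hi h1 hdsum
    have hie : i = (digits.length : Int) := by omega
    subst hie
    rw [PySem.List.pyRange_one_eq_nil (le_refl _), List.foldl_nil]
    have hdrop : digits.drop (digits.length : Int).toNat = [] := by
      simp
    rw [hdrop]
    unfold epilogB
    have hA1 : dfsA ds [] cur dsum true false = if dsum = ds ∧ cur = 0 then 1 else 0 := by
      rw [dfsA_nil]
      by_cases hgt : dsum > ds
      · rw [if_pos hgt, if_neg (by rintro ⟨h, -⟩; omega)]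
      · rw [if_neg hgt]
        simp
    have hA2 : dfsA ds [] 0 0 false true = 0 := by
      rw [dfsA_nil, if_neg (by omega)]
      simp
    rw [hA1, hA2, add_zero]
    simp only []
    split <;> ring
  | succ k ih =>
    intro i tot cur dsum hi h1 hdsum
    have hlen : i < (digits.length : Int) := by omega
    rw [PySem.List.pyRange_one_cons hlen, List.foldl_cons]
    have hi0 : 0 ≤ i := by omega
    have hidx : PySem.List.pyGetD digits i 0 = digits[i.toNat] := by
      rw [PySem.List.pyGetD_eq_getElem _ _ hi0 (by omega)]
    have hdmem : digits[i.toNat] ∈ digits := List.getElem_mem _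
    obtain ⟨hd0, hd9⟩ := hdig _ hdmem
    have hdropi : digits.drop i.toNat = digits[i.toNat] :: digits.drop (i.toNat + 1) :=
      List.drop_eq_getElem_cons (by omega)
    have hrest : digitsOK (digits.drop (i.toNat + 1)) :=
      fun x hx => hdig x (List.mem_of_mem_drop hx)
    have hrlen : ((digits.drop (i.toNat + 1)).length : Int) = (digits.length : Int) - 1 - i := by
      simp only [List.length_drop]
      omega
    -- unfold the step
    have hstep : dpSpineStepB ds (digits.length : Int) digits
        (dpTablesB ds (digits.length : Int)) (tot, cur, dsum) i
        = ( dpLeadAddB ds (digits.length : Int) (dpTablesB ds (digits.length : Int)) i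
              (dpTightAddB ds (digits.length : Int) digits (dpTablesB ds (digits.length : Int))
                (tot, cur, dsum) i)
          , PySem.Int.mod (cur * 10 + digits[i.toNat]) ds
          , dsum + digits[i.toNat] ) := by
      unfold dpSpineStepB
      rw [hidx]
    rw [hstep]
    have hIH := ih (i + 1)
      (dpLeadAddB ds (digits.length : Int) (dpTablesB ds (digits.length : Int)) i
        (dpTightAddB ds (digits.length : Int) digits (dpTablesB ds (digits.length : Int))
          (tot, cur, dsum) i))
      (PySem.Int.mod (cur * 10 + digits[i.toNat]) ds) (dsum + digits[i.toNat])
      (by omega) (by omega) (by omega)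
    have hi1 : (i + 1).toNat = i.toNat + 1 := by omega
    rw [hi1] at hIH
    rw [hIH]
    -- the tight contribution
    have hn1 : (1 : Int) ≤ (digits.length : Int) := by omega
    have hr0 : (0 : Int) ≤ (digits.length : Int) - 1 - i := by omega
    have hr1 : (digits.length : Int) - 1 - i < (digits.length : Int) := by omega
    have hrtoNat : ((digits.length : Int) - 1 - i).toNat = (digits.drop (i.toNat + 1)).length := by
      simp only [List.length_drop]
      omega
    have hds0 : 0 < ds := by omega
    have htight : dpTightAddB ds (digits.length : Int) digits (dpTablesB ds (digits.length : Int))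
        (tot, cur, dsum) i
        = tot + (if dsum ≤ ds then
            ((PySem.List.pyRange 0 digits[i.toNat]).map
              (fun j => if dsum + j ≤ ds then
                tabF ds (digits.drop (i.toNat + 1)).length
                  (PySem.Int.mod (cur * 10 + j) ds) (dsum + j) else 0)).sum
          else 0) := by
      unfold dpTightAddB
      simp only [hidx]
      by_cases hg : dsum ≤ ds
      · rw [if_pos hg, if_pos hg, if_neg (show ¬ i = 0 by omega)]
        rw [PySem.List.foldl_congr_mem _ _
          (fun t j => if dsum + j ≤ ds then t + tabF ds (digits.drop (i.toNat + 1)).length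
            (PySem.Int.mod (cur * 10 + j) ds) (dsum + j) else t) tot ?_]
        · rw [foldl_guard_add]
        · intro acc j hj
          rw [PySem.List.mem_pyRange_one] at hj
          by_cases hg2 : dsum + j ≤ ds
          · simp only [if_pos hg2]
            rw [lookup_eq ds (digits.length : Int) ((digits.length : Int) - 1 - i)
                (PySem.Int.mod (cur * 10 + j) ds) (dsum + j) hn1 hr0 hr1
                (PySem.Int.mod_nonneg _ hds0) (PySem.Int.mod_lt _ hds0) (by omega) hg2,
              hrtoNat]
          · simp only [if_neg hg2]
      · rw [if_neg hg, if_neg hg, add_zero]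
    have hlead : ∀ t0, dpLeadAddB ds (digits.length : Int) (dpTablesB ds (digits.length : Int)) i t0
        = t0 + ((PySem.List.pyRange 1 (min 9 ds + 1)).map
            (fun j => tabF ds (digits.drop (i.toNat + 1)).length (PySem.Int.mod j ds) j)).sum := by
      intro t0
      unfold dpLeadAddB
      rw [if_pos (show i > 0 by omega)]
      rw [PySem.List.foldl_congr_mem _ _
        (fun t j => t + tabF ds (digits.drop (i.toNat + 1)).length (PySem.Int.mod j ds) j) t0 ?_]
      · rw [PySem.List.foldl_add]
      · intro acc j hj
        rw [PySem.List.mem_pyRange_one] at hj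
        simp only []
        rw [lookup_eq ds (digits.length : Int) ((digits.length : Int) - 1 - i)
            (PySem.Int.mod j ds) j hn1 hr0 hr1
            (PySem.Int.mod_nonneg _ hds0) (PySem.Int.mod_lt _ hds0) (by omega) (by omega),
          hrtoNat]
    rw [hlead, htight, hdropi]
    -- A-side expansions
    have hleadA := lead_split ds digits[i.toNat] (digits.drop (i.toNat + 1)) hds hrest
    by_cases hg : dsum ≤ ds
    · rw [if_pos hg]
      have htightA := tight_split ds digits[i.toNat] (digits.drop (i.toNat + 1)) cur dsum false
        hds (by simpa using hd0) hd9 hrest hdsum hg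
      simp only [Bool.false_eq_true, if_false, zero_add] at htightA
      rw [htightA, hleadA]
      ring
    · rw [if_neg hg]
      rw [dfsA_gt ds _ cur dsum true false (by omega),
        dfsA_gt ds _ (PySem.Int.mod (cur * 10 + digits[i.toNat]) ds) (dsum + digits[i.toNat])
          true false (by omega),
        hleadA]
      ring

-- ===== VERDICT (by name: the statement is the Claim_ definition above) =====
theorem dp_spec : Claim_equal_dp := by
  intro s_num ds _ hpre
  obtain ⟨hs0, hds⟩ := hpre
  unfold Spec_dp dp
  by_cases hz : s_num = 0
  · subst hz
    rw [digitsA_zero, dfsA_snum_zero]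
    unfold dp_alt
    rw [if_pos (Or.inl rfl)]
  · have hpos : 0 < s_num := by omega
    have hdsne : ds ≠ 0 := by tauto
    have hok : digitsOK (dpDigitsA s_num) := digitsA_ok s_num hs0
    by_cases hneg : ds < 0
    · rw [dfsA_gt _ _ _ _ _ _ (by omega)]
      unfold dp_alt
      rw [if_pos (Or.inr (Or.inl hneg))]
    · have hds1 : 1 ≤ ds := by omega
      obtain ⟨d0, rest, hdig, hd01, hd09⟩ := digitsA_head s_num hpos
      have hdigB : dpDigitsB s_num = dpDigitsA s_num := rfl
      by_cases hbig : 9 * ((dpDigitsA s_num).length : Int) < ds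
      · rw [dfsA_big ds _ _ _ _ _ hok (by omega)]
        unfold dp_alt
        rw [hdigB, if_pos (Or.inr (Or.inr hbig))]
      · -- main case
        unfold dp_alt
        rw [hdigB, if_neg (by simp only [not_or]; exact ⟨hz, by omega, by omega⟩)]
        set digits := dpDigitsA s_num with hdigits
        have hlen1 : 1 ≤ (digits.length : Int) := by
          rw [hdig]; simp
        show dfsA ds digits 0 0 true true = epilogB ds _
        have h0len : (0 : Int) < (digits.length : Int) := by omega
        rw [PySem.List.pyRange_one_cons h0len, List.foldl_cons]
        have hidx0 : PySem.List.pyGetD digits 0 0 = d0 := by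
          rw [PySem.List.pyGetD_eq_getElem _ _ (by norm_num)
            (by rw [hdig, List.length_cons]; push_cast; omega)]
          simp [hdig]
        have hstep0 : dpSpineStepB ds (digits.length : Int) digits
            (dpTablesB ds (digits.length : Int)) (0, 0, 0) 0
            = ( dpTightAddB ds (digits.length : Int) digits (dpTablesB ds (digits.length : Int))
                  (0, 0, 0) 0
              , PySem.Int.mod (0 * 10 + d0) ds
              , 0 + d0 ) := by
          unfold dpSpineStepB dpLeadAddB
          rw [hidx0, if_neg (show ¬ (0 : Int) > 0 by omega)]
        rw [hstep0]
        have hrest : digitsOK rest := by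
          intro x hx
          exact hok x (by rw [hdig]; exact List.mem_cons_of_mem _ hx)
        have hds0 : 0 < ds := by omega
        have hrlen : ((digits.length : Int) - 1 - 0).toNat = rest.length := by
          rw [hdig]; simp
        have htight0 : dpTightAddB ds (digits.length : Int) digits
            (dpTablesB ds (digits.length : Int)) (0, 0, 0) 0
            = 0 + ((PySem.List.pyRange 1 d0).map
                (fun j => if 0 + j ≤ ds then
                  tabF ds rest.length (PySem.Int.mod (0 * 10 + j) ds) (0 + j) else 0)).sum := by
          unfold dpTightAddB
          simp only [hidx0]
          rw [if_pos (show (0 : Int) ≤ ds by omega), if_pos (show True from trivial)]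
          rw [PySem.List.foldl_congr_mem _ _
            (fun t j => if (0 : Int) + j ≤ ds then t + tabF ds rest.length
              (PySem.Int.mod (0 * 10 + j) ds) (0 + j) else t) 0 ?_]
          · rw [foldl_guard_add]
          · intro acc j hj
            rw [PySem.List.mem_pyRange_one] at hj
            by_cases hg2 : (0 : Int) + j ≤ ds
            · simp only [if_pos hg2]
              rw [lookup_eq ds (digits.length : Int) ((digits.length : Int) - 1 - 0)
                  (PySem.Int.mod (0 * 10 + j) ds) (0 + j) hlen1 (by omega) (by omega)
                  (PySem.Int.mod_nonneg _ hds0) (PySem.Int.mod_lt _ hds0) (by omega) hg2,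
                hrlen]
            · simp only [if_neg hg2]
        rw [htight0]
        have hspine := spine_inv ds digits hds1 hok (digits.length - 1) 1
          (0 + ((PySem.List.pyRange 1 d0).map
            (fun j => if 0 + j ≤ ds then
              tabF ds rest.length (PySem.Int.mod (0 * 10 + j) ds) (0 + j) else 0)).sum)
          (PySem.Int.mod (0 * 10 + d0) ds) (0 + d0)
          (by omega) (le_refl _) (by omega)
        have hdrop1 : digits.drop (1 : Int).toNat = rest := by
          rw [hdig]
          rfl
        rw [hdrop1] at hspine
        rw [show (0 : Int) + 1 = 1 by norm_num, hspine]
        have hA := tight_split ds d0 rest 0 0 true hds1 (by simpa using hd01) hd09 hrest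
          (le_refl _) (by omega)
        simp only [if_true] at hA
        have hdig' : digits = d0 :: rest := hdig
        rw [hdig', hA]
        ring
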